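-- pv_equiv track=rewrite | github.com/80-20-Human-In-The-Loop/Storm-Checker | tests/run_tests_old.py | _format_missing_lines
-- ===== SOURCE A (Python) =====
-- from typing import List, Optional, Tuple, Dict, Any
--
-- def _format_missing_lines(lines: List[int]) -> str:
--     """Format missing line numbers compactly."""
--     if not lines:
--         return ""
--
--     lines = sorted(lines)
--     ranges = []
--     start = lines[0]
--     end = lines[0]
--
--     for line in lines[1:]:
--         if line == end + 1:
--             end = line
--         else:
--             if start == end:
--                 ranges.append(str(start))
--             else:
--                 ranges.append(f"{start}-{end}")
--             start = line
--             end = line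
--
--     # Add last range
--     if start == end:
--         ranges.append(str(start))
--     else:
--         ranges.append(f"{start}-{end}")
--
--     # Limit to first 5 ranges
--     if len(ranges) > 5:
--         return ", ".join(ranges[:5]) + "..."
--
--     return ", ".join(ranges)
-- ===== SOURCE B (Python) =====
-- # B: staged, state-free pipeline — a key array (value minus index) makes run
-- # boundaries visible as adjacent key changes; starts/ends are extracted by zip
-- # comprehensions and paired, instead of A's stateful start/end merge loop.
-- def _format_missing_lines(lines):
--     """Format missing line numbers compactly."""
--     if not lines:
--         return ""
--     vals = sorted(lines)
--     keys = [v - i for i, v in enumerate(vals)]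
--     starts = [vals[0]] + [v for (k0, k1, v) in zip(keys, keys[1:], vals[1:]) if k1 != k0]
--     ends = [v for (k0, k1, v) in zip(keys, keys[1:], vals) if k1 != k0] + [vals[-1]]
--     ranges = [_fmt(s, e) for s, e in zip(starts, ends)]
--     if len(ranges) > 5:
--         return ", ".join(ranges[:5]) + "..."
--     return ", ".join(ranges)
--
-- def _fmt(a, b):
--     return str(a) if a == b else f"{a}-{b}"
-- ===== Notes on version B (the rewrite author's own statement) =====
-- stated objective: alternative
-- what changed: Replaces A's stateful start/end merge loop by a state-free staged pipeline: a key array (value minus index) exposes run boundaries as adjacent key changes, and run starts/ends are extracted by zip comprehensions and paired; the cap/join step is shared.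
import Mathlib
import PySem

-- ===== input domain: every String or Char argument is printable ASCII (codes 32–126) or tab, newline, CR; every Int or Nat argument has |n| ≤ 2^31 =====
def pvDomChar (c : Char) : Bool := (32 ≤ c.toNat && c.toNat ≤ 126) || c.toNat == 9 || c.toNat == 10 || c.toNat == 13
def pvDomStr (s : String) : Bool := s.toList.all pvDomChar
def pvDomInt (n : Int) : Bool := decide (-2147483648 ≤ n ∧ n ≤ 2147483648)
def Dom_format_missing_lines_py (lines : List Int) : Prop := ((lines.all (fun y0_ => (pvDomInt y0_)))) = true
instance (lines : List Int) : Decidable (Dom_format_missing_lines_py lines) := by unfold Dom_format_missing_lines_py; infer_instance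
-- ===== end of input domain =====

-- B replaces A's stateful start/end merge loop by a state-free staged pipeline (difference-key
-- array, boundary extraction by zips, pairing); same result, similar cost ("alternative").

-- ===== PORT A =====
-- A's for-loop over lines[1:] with mutable (start, end, ranges), as a foldl over the same state.
def pvStepA (st : Int × Int × List String) (line : Int) : Int × Int × List String :=
  if line = st.2.1 + 1 then (st.1, line, st.2.2)
  else (line, line,
    st.2.2 ++ [if st.1 = st.2.1 then PySem.Int.toStr st.1
               else PySem.Int.toStr st.1 ++ "-" ++ PySem.Int.toStr st.2.1])

def format_missing_lines_py (lines : List Int) : String :=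
  if lines = [] then "" else
  match PySem.List.sorted lines (fun x => x) false with
  | [] => ""   -- unreachable: sorted of a nonempty list is nonempty
  | x :: rest =>
    let st := List.foldl pvStepA (x, x, []) rest
    let ranges := st.2.2 ++ [if st.1 = st.2.1 then PySem.Int.toStr st.1
                             else PySem.Int.toStr st.1 ++ "-" ++ PySem.Int.toStr st.2.1]
    if 5 < ranges.length then PySem.Str.join ", " (ranges.take 5) ++ "..." else
    PySem.Str.join ", " ranges

-- ===== PORT B =====
def pvFmt (a b : Int) : String :=
  if a = b then PySem.Int.toStr a else PySem.Int.toStr a ++ "-" ++ PySem.Int.toStr b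

-- Source B's comprehension '[v for (k0, k1, v) in zip(keys, keys[1:], vals[1:]) if k1 != k0]'
def pvStarts (keys vals : List Int) : List Int :=
  ((keys.zip keys.tail).zip vals.tail).filterMap
    (fun t => if t.1.2 ≠ t.1.1 then some t.2 else none)

-- Source B's comprehension '[v for (k0, k1, v) in zip(keys, keys[1:], vals) if k1 != k0]'
def pvEnds (keys vals : List Int) : List Int :=
  ((keys.zip keys.tail).zip vals).filterMap
    (fun t => if t.1.2 ≠ t.1.1 then some t.2 else none)

def format_missing_lines_py_alt (lines : List Int) : String :=
  if lines = [] then "" else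
  let vals := PySem.List.sorted lines (fun x => x) false
  let keys := (PySem.List.enumerate vals 0).map (fun p => p.2 - p.1)
  -- vals[0] and vals[-1] are in range (vals nonempty here); pyGetD only makes them total
  let starts := PySem.List.pyGetD vals 0 0 :: pvStarts keys vals
  let ends := pvEnds keys vals ++ [PySem.List.pyGetD vals (-1) 0]
  let ranges := (starts.zip ends).map (fun p => pvFmt p.1 p.2)
  if 5 < ranges.length then PySem.Str.join ", " (ranges.take 5) ++ "..." else
  PySem.Str.join ", " ranges

-- ===== PRECONDITION & SPEC =====
def Spec_format_missing_lines_py (lines : List Int) (out : String) : Prop := out = format_missing_lines_py_alt lines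
instance (lines : List Int) (out : String) : Decidable (Spec_format_missing_lines_py lines out) := by unfold Spec_format_missing_lines_py; infer_instance

-- ===== CLAIM (what is proved, stated in full; the proofs are below) =====
def Claim_equal_format_missing_lines_py : Prop := ∀ (lines : List Int), Dom_format_missing_lines_py lines → Spec_format_missing_lines_py lines (format_missing_lines_py lines)

-- ===== LEMMAS AND PROOFS =====

-- The maximal-run decomposition both programs compute, as a structural recursion (proof-only).
def pvRunsStep (out : List (Int × Int)) (x : Int) : List (Int × Int) :=
  match out with
  | (a, b) :: rest => if x + 1 = a then (x, b) :: rest else (x, x) :: (a, b) :: rest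
  | [] => [(x, x)]

def pvRuns : List Int → List (Int × Int)
  | [] => []
  | x :: xs => pvRunsStep (pvRuns xs) x

-- A's loop result, written as a recursion on the remaining input (proof-only helper).
def pvRunsFrom (start e : Int) : List Int → List (Int × Int)
  | [] => [(start, e)]
  | y :: r => if y = e + 1 then pvRunsFrom start y r else (start, e) :: pvRunsFrom y y r

def pvUpdFirst (s : Int) : List (Int × Int) → List (Int × Int)
  | [] => []
  | (_, b) :: r => (s, b) :: r

def pvKeysFrom (k : Int) : List Int → List Int
  | [] => []
  | x :: xs => (x - k) :: pvKeysFrom (k + 1) xs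

lemma pvRuns_cons (x : Int) (xs : List Int) :
    pvRuns (x :: xs) = match pvRuns xs with
      | (a, b) :: rest => if x + 1 = a then (x, b) :: rest else (x, x) :: (a, b) :: rest
      | [] => [(x, x)] := rfl

lemma foldl_stepA_eq (rest : List Int) : ∀ (start e : Int) (acc : List String),
    (List.foldl pvStepA (start, e, acc) rest).2.2 ++
      [if (List.foldl pvStepA (start, e, acc) rest).1 = (List.foldl pvStepA (start, e, acc) rest).2.1
       then PySem.Int.toStr (List.foldl pvStepA (start, e, acc) rest).1
       else PySem.Int.toStr (List.foldl pvStepA (start, e, acc) rest).1 ++ "-" ++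
            PySem.Int.toStr (List.foldl pvStepA (start, e, acc) rest).2.1]
    = acc ++ (pvRunsFrom start e rest).map (fun p => pvFmt p.1 p.2) := by
  induction rest with
  | nil => intro start e acc; simp [pvRunsFrom, pvFmt]
  | cons y r ih =>
    intro start e acc
    simp only [List.foldl_cons, pvStepA, pvRunsFrom]
    by_cases h : y = e + 1
    · simp [h, ih]
    · simp [h, ih, pvFmt]

lemma pvRuns_head (x : Int) (xs : List Int) : ∃ b R, pvRuns (x :: xs) = (x, b) :: R := by
  induction xs generalizing x with
  | nil => exact ⟨x, [], rfl⟩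
  | cons y r ih =>
    obtain ⟨b, R, hb⟩ := ih y
    rw [pvRuns_cons x (y :: r), hb]
    by_cases h : x + 1 = y
    · exact ⟨b, R, by simp [h]⟩
    · exact ⟨x, (y, b) :: R, by simp [h]⟩

lemma pvRunsFrom_eq (rest : List Int) : ∀ (start e : Int),
    pvRunsFrom start e rest = pvUpdFirst start (pvRuns (e :: rest)) := by
  induction rest with
  | nil => intro start e; simp [pvRunsFrom, pvRuns, pvRunsStep, pvUpdFirst]
  | cons y r ih =>
    intro start e
    obtain ⟨b, R, hb⟩ := pvRuns_head y r
    rw [pvRuns_cons e (y :: r), hb]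
    have e1 : pvRunsFrom start e (y :: r)
        = if y = e + 1 then pvRunsFrom start y r else (start, e) :: pvRunsFrom y y r := rfl
    have e2 : (match (y, b) :: R with
        | (a, b') :: rest => if e + 1 = a then (e, b') :: rest else (e, e) :: (a, b') :: rest
        | [] => [(e, e)])
        = if e + 1 = y then (e, b) :: R else (e, e) :: (y, b) :: R := rfl
    by_cases h : y = e + 1
    · have h' : e + 1 = y := h.symm
      rw [e1, if_pos h, e2, if_pos h', ih start y, hb]
      rfl
    · have h' : ¬ e + 1 = y := fun hc => h hc.symm
      rw [e1, if_neg h, e2, if_neg h', ih y y, hb]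
      rfl

lemma pvRuns_self (x : Int) (rest : List Int) :
    pvRunsFrom x x rest = pvRuns (x :: rest) := by
  obtain ⟨b, R, hb⟩ := pvRuns_head x rest
  rw [pvRunsFrom_eq, hb]; rfl

-- B-side: the enumerate-based key list is pvKeysFrom.
lemma enumerate_keys (vals : List Int) : ∀ (s : Int),
    (PySem.List.enumerate vals s).map (fun p => p.2 - p.1) = pvKeysFrom s vals := by
  induction vals with
  | nil => intro s; simp [PySem.List.enumerate_nil, pvKeysFrom]
  | cons x xs ih => intro s; simp [PySem.List.enumerate_cons, pvKeysFrom, ih]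

-- B-side main lemma: pairing the extracted starts and ends yields the run decomposition.
lemma starts_zip_ends (rest : List Int) : ∀ (x k : Int),
    (x :: pvStarts (pvKeysFrom k (x :: rest)) (x :: rest)).zip
      (pvEnds (pvKeysFrom k (x :: rest)) (x :: rest) ++ [(x :: rest).getLast (by simp)])
    = pvRuns (x :: rest) := by
  induction rest with
  | nil =>
    intro x k
    simp [pvKeysFrom, pvStarts, pvEnds, pvRuns, pvRunsStep]
  | cons y r ih =>
    intro x k
    have hkeys : pvKeysFrom k (x :: y :: r)
        = (x - k) :: pvKeysFrom (k + 1) (y :: r) := rfl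
    have hkeys' : pvKeysFrom (k + 1) (y :: r)
        = (y - (k + 1)) :: pvKeysFrom (k + 1 + 1) r := rfl
    -- unfold one step of starts and ends
    have hS : pvStarts (pvKeysFrom k (x :: y :: r)) (x :: y :: r)
        = (if y - (k + 1) ≠ x - k then [y] else [])
          ++ pvStarts (pvKeysFrom (k + 1) (y :: r)) (y :: r) := by
      simp only [pvStarts, hkeys, hkeys', List.tail_cons, List.zip_cons_cons,
        List.filterMap_cons]
      by_cases h : y - (k + 1) ≠ x - k <;> simp [h]
    have hE : pvEnds (pvKeysFrom k (x :: y :: r)) (x :: y :: r)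
        = (if y - (k + 1) ≠ x - k then [x] else [])
          ++ pvEnds (pvKeysFrom (k + 1) (y :: r)) (y :: r) := by
      simp only [pvEnds, hkeys, hkeys', List.tail_cons, List.zip_cons_cons,
        List.filterMap_cons]
      by_cases h : y - (k + 1) ≠ x - k <;> simp [h]
    have hL : (x :: y :: r).getLast (by simp) = (y :: r).getLast (by simp) := by
      simp [List.getLast_cons]
    obtain ⟨b, R, hb⟩ := pvRuns_head y r
    have IH := ih y (k + 1)
    by_cases h : y = x + 1
    · have hc : ¬ (y - (k + 1) ≠ x - k) := by omega
      rw [hS, hE, hL, if_neg hc, if_neg hc, List.nil_append, List.nil_append]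
      -- ends list is nonempty: split it
      cases hEc : pvEnds (pvKeysFrom (k + 1) (y :: r)) (y :: r)
          ++ [(y :: r).getLast (by simp)] with
      | nil => exact absurd hEc (by simp)
      | cons e T =>
        rw [hEc] at IH
        rw [hb] at IH
        rw [List.zip_cons_cons] at IH ⊢
        injection IH with he hT
        have heb : e = b := by injection he
        rw [pvRuns_cons x (y :: r), hb]
        have h' : x + 1 = y := h.symm
        simp [h', heb, hT]
    · have hc : (y - (k + 1) ≠ x - k) := by omega
      rw [hS, hE, hL, if_pos hc, if_pos hc]
      simp only [List.cons_append, List.nil_append, List.zip_cons_cons]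
      rw [IH, pvRuns_cons x (y :: r), hb]
      have hxy : ¬ x + 1 = y := fun hc' => h hc'.symm
      simp [hxy]

-- ===== VERDICT (by name: the statement is the Claim_ definition above) =====
theorem format_missing_lines_py_spec : Claim_equal_format_missing_lines_py := by
  intro lines _
  unfold Spec_format_missing_lines_py format_missing_lines_py format_missing_lines_py_alt
  by_cases hnil : lines = []
  · simp [hnil]
  · simp only [if_neg hnil]
    cases hs : PySem.List.sorted lines (fun x => x) false with
    | nil =>
      exact absurd ((PySem.List.sorted_eq_nil_iff lines (fun x => x) false).mp hs) hnil
    | cons x rest =>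
      have hA := foldl_stepA_eq rest x x []
      rw [pvRuns_self] at hA
      simp only [List.nil_append] at hA
      have hget0 : PySem.List.pyGetD (x :: rest) 0 0 = x :=
        PySem.List.pyGetD_zero_cons x rest 0
      have hgetl : PySem.List.pyGetD (x :: rest) (-1) 0
          = (x :: rest).getLast (by simp) := by
        exact PySem.List.pyGetD_neg_one (x :: rest) 0 (List.cons_ne_nil x rest)
      have hB : ((PySem.List.pyGetD (x :: rest) 0 0
            :: pvStarts ((PySem.List.enumerate (x :: rest) 0).map (fun p => p.2 - p.1)) (x :: rest)).zip
          (pvEnds ((PySem.List.enumerate (x :: rest) 0).map (fun p => p.2 - p.1)) (x :: rest)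
            ++ [PySem.List.pyGetD (x :: rest) (-1) 0])).map (fun p => pvFmt p.1 p.2)
          = (pvRuns (x :: rest)).map (fun p => pvFmt p.1 p.2) := by
        rw [hget0, hgetl, enumerate_keys (x :: rest) 0, starts_zip_ends rest x 0]
      simp only [hA, hB]
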